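-- pv_equiv track=rewrite | github.com/lgbouma/cdips | cdips/utils/collect_cdips_lightcurves.py | given_sector_cam_ccd_get_projid
-- ===== SOURCE A (Python) =====
-- def given_sector_cam_ccd_get_projid(_sector,_cam,_ccd):
--
--     projid = 1650
--
--     d = {}
--     for snum in [1,2,3,4,5]:
--         d[snum] = {}
--         for cam in range(1,5):
--             d[snum][cam] = {}
--             for ccd in range(1,5):
--                 d[snum][cam][ccd] = projid
--                 projid += 1
--
--     projid = 1500
--
--     for snum in [6,7,8,9,10,11,12,13]:
--         d[snum] = {}
--         for cam in range(1,5):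
--             d[snum][cam] = {}
--             for ccd in range(1,5):
--                 d[snum][cam][ccd] = projid
--                 projid += 1
--
--     projid = 1750
--
--     for snum in [14,15,16,17,18,19,20,21,22,23,24,25,26]:
--         d[snum] = {}
--         for cam in range(1,5):
--             d[snum][cam] = {}
--             for ccd in range(1,5):
--                 d[snum][cam][ccd] = projid
--                 projid += 1
--
--     return d[_sector][_cam][_ccd]
-- ===== SOURCE B (Python) =====
-- def given_sector_cam_ccd_get_projid(_sector, _cam, _ccd):
--     if 1 <= _sector <= 5:
--         base, start = 1650, 1
--     elif 6 <= _sector <= 13: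
--         base, start = 1500, 6
--     elif 14 <= _sector <= 26:
--         base, start = 1750, 14
--     else:
--         raise KeyError(_sector)
--     if not (1 <= _cam <= 4):
--         raise KeyError(_cam)
--     if not (1 <= _ccd <= 4):
--         raise KeyError(_ccd)
--     return base + 16 * (_sector - start) + 4 * (_cam - 1) + (_ccd - 1)
-- ===== Notes on version B (the rewrite author's own statement) =====
-- stated objective: faster
-- what changed: Replaces building the full 26x4x4 nested dictionary on every call with a closed-form arithmetic formula (base offset per sector group plus 16/4/1 strides).
import Mathlib
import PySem

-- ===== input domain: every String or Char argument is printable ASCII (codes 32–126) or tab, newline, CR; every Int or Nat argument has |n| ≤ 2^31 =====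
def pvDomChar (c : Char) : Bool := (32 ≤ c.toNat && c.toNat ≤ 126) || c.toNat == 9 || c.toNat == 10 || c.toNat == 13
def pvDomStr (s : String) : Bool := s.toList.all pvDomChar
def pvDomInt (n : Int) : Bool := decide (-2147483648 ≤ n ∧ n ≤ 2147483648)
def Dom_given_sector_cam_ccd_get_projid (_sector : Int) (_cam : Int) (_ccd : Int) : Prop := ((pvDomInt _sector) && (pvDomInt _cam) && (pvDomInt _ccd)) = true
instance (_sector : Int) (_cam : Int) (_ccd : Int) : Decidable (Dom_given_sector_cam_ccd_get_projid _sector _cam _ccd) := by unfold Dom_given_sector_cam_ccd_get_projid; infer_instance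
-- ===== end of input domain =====

-- B replaces A's per-call construction of the full 26x4x4 nested dict with a closed-form
-- arithmetic formula (constant-factor speedup; exact same values on the dict's key range).

-- ===== PORT A =====
-- inner 'for ccd in range(1,5)' loop: fills one ccd-level dict, threading projid
def pvCcdLoop (projid : Int) : PySem.Dict Int Int × Int :=
  (PySem.List.pyRange 1 5 1).foldl
    (fun st ccd => (st.1.insert ccd st.2, st.2 + 1)) (PySem.Dict.empty, projid)

-- 'for cam in range(1,5)' loop: fills one cam-level dict, threading projid
def pvCamLoop (projid : Int) : PySem.Dict Int (PySem.Dict Int Int) × Int :=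
  (PySem.List.pyRange 1 5 1).foldl
    (fun st cam =>
      let r := pvCcdLoop st.2
      (st.1.insert cam r.1, r.2))
    (PySem.Dict.empty, projid)

-- 'for snum in [...]' loop over one sector group, threading the outer dict and projid
def pvSectorLoop (d : PySem.Dict Int (PySem.Dict Int (PySem.Dict Int Int))) (projid : Int)
    (snums : List Int) : PySem.Dict Int (PySem.Dict Int (PySem.Dict Int Int)) × Int :=
  snums.foldl
    (fun st snum =>
      let r := pvCamLoop st.2
      (st.1.insert snum r.1, r.2))
    (d, projid)

def given_sector_cam_ccd_get_projid (_sector : Int) (_cam : Int) (_ccd : Int) : Int :=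
  let d1 := (pvSectorLoop PySem.Dict.empty 1650 [1,2,3,4,5]).1
  let d2 := (pvSectorLoop d1 1500 [6,7,8,9,10,11,12,13]).1
  let d3 := (pvSectorLoop d2 1750 [14,15,16,17,18,19,20,21,22,23,24,25,26]).1
  -- d[_sector][_cam][_ccd]; KeyError (none) is excluded by Pre_, so 0 is never returned
  (((d3.get? _sector).bind fun dc => (dc.get? _cam).bind fun dcc => dcc.get? _ccd).getD 0)

-- ===== PORT B =====
def given_sector_cam_ccd_get_projid_alt (_sector : Int) (_cam : Int) (_ccd : Int) : Int :=
  -- raise KeyError branches are excluded by Pre_; 0 stands for no value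
  if 1 ≤ _sector ∧ _sector ≤ 5 then
    1650 + 16 * (_sector - 1) + 4 * (_cam - 1) + (_ccd - 1)
  else if 6 ≤ _sector ∧ _sector ≤ 13 then
    1500 + 16 * (_sector - 6) + 4 * (_cam - 1) + (_ccd - 1)
  else if 14 ≤ _sector ∧ _sector ≤ 26 then
    1750 + 16 * (_sector - 14) + 4 * (_cam - 1) + (_ccd - 1)
  else 0

-- ===== PRECONDITION & SPEC =====
-- exactly the keys present in A's dict: anything else raises KeyError in both programs
def Pre_given_sector_cam_ccd_get_projid (_sector : Int) (_cam : Int) (_ccd : Int) : Prop :=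
  (1 ≤ _sector ∧ _sector ≤ 26) ∧ (1 ≤ _cam ∧ _cam ≤ 4) ∧ (1 ≤ _ccd ∧ _ccd ≤ 4)
instance (_sector : Int) (_cam : Int) (_ccd : Int) : Decidable (Pre_given_sector_cam_ccd_get_projid _sector _cam _ccd) := by unfold Pre_given_sector_cam_ccd_get_projid; infer_instance
def pvWitness_given_sector_cam_ccd_get_projid : Int × Int × Int := (7, 3, 2)

def Spec_given_sector_cam_ccd_get_projid (_sector : Int) (_cam : Int) (_ccd : Int) (out : Int) : Prop := out = given_sector_cam_ccd_get_projid_alt _sector _cam _ccd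
instance (_sector : Int) (_cam : Int) (_ccd : Int) (out : Int) : Decidable (Spec_given_sector_cam_ccd_get_projid _sector _cam _ccd out) := by unfold Spec_given_sector_cam_ccd_get_projid; infer_instance

-- ===== CLAIM (what is proved, stated in full; the proofs are below) =====
def Claim_equal_given_sector_cam_ccd_get_projid : Prop := ∀ (_sector : Int) (_cam : Int) (_ccd : Int), Dom_given_sector_cam_ccd_get_projid _sector _cam _ccd → Pre_given_sector_cam_ccd_get_projid _sector _cam _ccd → Spec_given_sector_cam_ccd_get_projid _sector _cam _ccd (given_sector_cam_ccd_get_projid _sector _cam _ccd)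

-- ===== LEMMAS AND PROOFS =====
set_option maxHeartbeats 2000000 in
theorem pv_key : ∀ s ∈ Finset.Icc (1:Int) 26, ∀ c ∈ Finset.Icc (1:Int) 4, ∀ d ∈ Finset.Icc (1:Int) 4,
    given_sector_cam_ccd_get_projid s c d = given_sector_cam_ccd_get_projid_alt s c d := by
  decide

-- ===== VERDICT (by name: the statement is the Claim_ definition above) =====
theorem given_sector_cam_ccd_get_projid_spec : Claim_equal_given_sector_cam_ccd_get_projid := by
  intro s c d _ hpre
  obtain ⟨⟨h1, h2⟩, ⟨h3, h4⟩, ⟨h5, h6⟩⟩ := hpre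
  exact pv_key s (Finset.mem_Icc.mpr ⟨h1, h2⟩) c (Finset.mem_Icc.mpr ⟨h3, h4⟩) d (Finset.mem_Icc.mpr ⟨h5, h6⟩)
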